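-- pv_equiv track=rewrite | github.com/izunori/algo_for_competition | algo_FastHadamardTransform.py | xorConv
-- ===== SOURCE A (Python) =====
-- MOD = 998244353
--
-- def FastWalshHadamardTransform(a):
--     k = (len(a) - 1).bit_length()
--     a += [0]*(2**k - len(a))
--     h = 1
--     for _ in range(k):
--         for i in range(0,len(a),h*2):
--             for j in range(i,i+h):
--                 a[j],a[j+h] = (a[j]+a[j+h])%MOD,(a[j]-a[j+h])%MOD
--         h *= 2
--
-- def xorConv(X,Y):
--     k = max((len(X)-1).bit_length(), (len(Y)-1).bit_length())
--     X += [0]*(2**k - len(X))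
--     Y += [0]*(2**k - len(Y))
--     FastWalshHadamardTransform(X)
--     FastWalshHadamardTransform(Y)
--     for i in range(len(X)):
--         X[i] = (X[i]*Y[i]) % MOD
--     FastWalshHadamardTransform(X)
--     ik = pow(pow(2,MOD-2,MOD),k,MOD)
--     for i in range(len(X)):
--         X[i] = (X[i]*ik) % MOD
--     return X
-- ===== SOURCE B (Python) =====
-- MOD = 998244353
--
-- def _fwht(a):
--     # recursive divide-and-conquer Walsh-Hadamard transform, returns a new list
--     if len(a) == 1:
--         return a[:]
--     h = len(a) // 2
--     l = _fwht(a[:h])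
--     r = _fwht(a[h:])
--     return [(x + y) % MOD for x, y in zip(l, r)] + [(x - y) % MOD for x, y in zip(l, r)]
--
-- def xorConv(X, Y):
--     k = max((len(X) - 1).bit_length(), (len(Y) - 1).bit_length())
--     n = 2 ** k
--     A = _fwht(X + [0] * (n - len(X)))
--     B = _fwht(Y + [0] * (n - len(Y)))
--     C = _fwht([(x * y) % MOD for x, y in zip(A, B)])
--     ik = pow(pow(2, MOD - 2, MOD), k, MOD)
--     return [(c * ik) % MOD for c in C]
-- ===== Notes on version B (the rewrite author's own statement) =====
-- stated objective: alternative
-- what changed: The iterative in-place triple-loop Walsh-Hadamard transform is replaced by a pure recursive divide-and-conquer transform (split halves, recurse, combine with zip), and the pointwise multiply/scale loops become list comprehensions; B builds new lists instead of mutating X and Y in place.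
import Mathlib
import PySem

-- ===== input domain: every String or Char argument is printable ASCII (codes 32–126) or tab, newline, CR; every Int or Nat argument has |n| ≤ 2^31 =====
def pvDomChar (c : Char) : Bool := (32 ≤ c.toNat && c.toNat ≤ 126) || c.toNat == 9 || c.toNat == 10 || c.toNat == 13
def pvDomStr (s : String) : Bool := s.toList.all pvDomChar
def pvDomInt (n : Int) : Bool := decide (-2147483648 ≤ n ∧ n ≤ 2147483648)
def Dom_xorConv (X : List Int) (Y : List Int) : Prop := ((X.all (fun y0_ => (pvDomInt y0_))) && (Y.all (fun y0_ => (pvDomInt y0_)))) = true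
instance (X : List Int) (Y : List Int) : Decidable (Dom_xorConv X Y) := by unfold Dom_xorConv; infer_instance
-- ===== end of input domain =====

-- B replaces A's iterative in-place triple-loop Walsh-Hadamard transform by a pure recursive
-- divide-and-conquer transform (alternative decomposition, same cost). Equivalence is about the
-- RETURN value only: Python A mutates X and Y in place (pads and transforms them), B does not.

-- ===== PORT A =====
def pvMOD : Int := 998244353

-- innermost loop body: a[j], a[j+h] = (a[j]+a[j+h])%MOD, (a[j]-a[j+h])%MOD
-- (the RHS pair is evaluated before assigning; loop indices are always in range, where pyGetD/pySetD are exact)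
def pvBfly (a : List Int) (j : Int) (h : Nat) : List Int :=
  let x := PySem.List.pyGetD a j 0
  let y := PySem.List.pyGetD a (j + (h : Int)) 0
  PySem.List.pySetD (PySem.List.pySetD a j (PySem.Int.mod (x + y) pvMOD))
    (j + (h : Int)) (PySem.Int.mod (x - y) pvMOD)

-- 'for i in range(0, len(a), h*2): for j in range(i, i+h): …'
def pvStage (a : List Int) (h : Nat) : List Int :=
  (PySem.List.pyRange 0 (a.length : Int) ((h : Int) * 2)).foldl
    (fun b i => (PySem.List.pyRange i (i + (h : Int)) 1).foldl (fun c j => pvBfly c j h) b) a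

-- FastWalshHadamardTransform (returns the new list where the Python mutates its argument)
def pvFWHT (a : List Int) : List Int :=
  let k := PySem.Int.bitLength ((a.length : Int) - 1)
  let a := a ++ List.replicate (2 ^ k - a.length) 0
  ((List.range k).foldl (fun (p : List Int × Nat) _ => (pvStage p.1 p.2, p.2 * 2)) (a, 1)).1

def xorConv (X : List Int) (Y : List Int) : List Int :=
  let k := max (PySem.Int.bitLength ((X.length : Int) - 1)) (PySem.Int.bitLength ((Y.length : Int) - 1))
  let X1 := X ++ List.replicate (2 ^ k - X.length) 0
  let Y1 := Y ++ List.replicate (2 ^ k - Y.length) 0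
  let X2 := pvFWHT X1
  let Y2 := pvFWHT Y1
  let X3 := (PySem.List.pyRange 0 (X2.length : Int) 1).foldl
    (fun b i => PySem.List.pySetD b i
      (PySem.Int.mod (PySem.List.pyGetD b i 0 * PySem.List.pyGetD Y2 i 0) pvMOD)) X2
  let X4 := pvFWHT X3
  let ik := PySem.Int.powMod (PySem.Int.powMod 2 (pvMOD - 2).toNat pvMOD) k pvMOD
  (PySem.List.pyRange 0 (X4.length : Int) 1).foldl
    (fun b i => PySem.List.pySetD b i (PySem.Int.mod (PySem.List.pyGetD b i 0 * ik) pvMOD)) X4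

-- ===== PORT B =====
def pvZipAdd (l r : List Int) : List Int := List.zipWith (fun x y => PySem.Int.mod (x + y) pvMOD) l r
def pvZipSub (l r : List Int) : List Int := List.zipWith (fun x y => PySem.Int.mod (x - y) pvMOD) l r

-- recursive divide-and-conquer transform of Source B ('≤ 1' instead of '== 1' is only a termination
-- guard: Source B never calls _fwht on an empty list)
def pvFwhtRec (a : List Int) : List Int :=
  if a.length ≤ 1 then a
  else
    let h := a.length / 2
    let l := pvFwhtRec (a.take h)
    let r := pvFwhtRec (a.drop h)
    pvZipAdd l r ++ pvZipSub l r
termination_by a.length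
decreasing_by
  · simp only [List.length_take]; omega
  · simp only [List.length_drop]; omega

def xorConv_alt (X : List Int) (Y : List Int) : List Int :=
  let k := max (PySem.Int.bitLength ((X.length : Int) - 1)) (PySem.Int.bitLength ((Y.length : Int) - 1))
  let n := 2 ^ k
  let A := pvFwhtRec (X ++ List.replicate (n - X.length) 0)
  let B := pvFwhtRec (Y ++ List.replicate (n - Y.length) 0)
  let C := pvFwhtRec (List.zipWith (fun x y => PySem.Int.mod (x * y) pvMOD) A B)
  let ik := PySem.Int.powMod (PySem.Int.powMod 2 (pvMOD - 2).toNat pvMOD) k pvMOD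
  C.map (fun c => PySem.Int.mod (c * ik) pvMOD)

-- ===== PRECONDITION & SPEC =====
def Spec_xorConv (X : List Int) (Y : List Int) (out : List Int) : Prop := out = xorConv_alt X Y
instance (X : List Int) (Y : List Int) (out : List Int) : Decidable (Spec_xorConv X Y out) := by unfold Spec_xorConv; infer_instance

-- ===== CLAIM (what is proved, stated in full; the proofs are below) =====
def Claim_equal_xorConv : Prop := ∀ (X : List Int) (Y : List Int), Dom_xorConv X Y → Spec_xorConv X Y (xorConv X Y)

-- ===== LEMMAS AND PROOFS =====

-- Nat-indexed form of the butterfly update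
def bflyN (a : List Int) (c h : Nat) : List Int :=
  (a.set c (PySem.Int.mod (a.getD c 0 + a.getD (c + h) 0) pvMOD)).set (c + h)
    (PySem.Int.mod (a.getD c 0 - a.getD (c + h) 0) pvMOD)

theorem pvBfly_natCast (a : List Int) (c h : Nat) : pvBfly a ((c : Int)) h = bflyN a c h := by
  unfold pvBfly bflyN
  have hc : ((c : Int) + (h : Int)) = ((c + h : Nat) : Int) := by push_cast; ring
  rw [hc]
  simp only [PySem.List.pyGetD_natCast, PySem.List.pySetD_natCast]

-- one stage of the transform, described block-recursively (proof-side spec of pvStage)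
def stageRec (h : Nat) : Nat → List Int → List Int
  | 0, b => b
  | m + 1, b =>
      pvZipAdd (b.take h) ((b.drop h).take h) ++ pvZipSub (b.take h) ((b.drop h).take h)
        ++ stageRec h m (b.drop (h * 2))

-- one butterfly acts on a decomposed list: prefix p, x at offset |p|, y at offset |p|+h
theorem bflyN_block (p u' g v' s : List Int) (x y : Int) (h : Nat)
    (hu : (x :: u').length + g.length = h) :
    bflyN (p ++ x :: u' ++ g ++ y :: v' ++ s) p.length h
      = p ++ (PySem.Int.mod (x + y) pvMOD) :: u' ++ g ++ (PySem.Int.mod (x - y) pvMOD) :: v' ++ s := by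
  unfold bflyN
  have hget1 : (p ++ x :: u' ++ g ++ y :: v' ++ s).getD p.length 0 = x := by
    rw [List.append_assoc, List.append_assoc, List.append_assoc,
      List.getD_append_right p _ 0 p.length (le_refl _)]
    simp
  have hget2 : (p ++ x :: u' ++ g ++ y :: v' ++ s).getD (p.length + h) 0 = y := by
    rw [List.append_assoc, List.append_assoc, List.append_assoc,
      List.getD_append_right p _ 0 _ (by omega)]
    have : p.length + h - p.length = h := by omega
    rw [this]
    rw [show (x :: u' ++ (g ++ (y :: v' ++ s))) = (x :: u' ++ g) ++ (y :: v' ++ s) by simp,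
      List.getD_append_right _ _ 0 h (by simp at hu ⊢; omega)]
    simp only [List.length_cons] at hu
    have hz : h - (x :: u' ++ g).length = 0 := by simp; omega
    rw [hz]
    rfl
  rw [hget1, hget2]
  rw [show p ++ x :: u' ++ g ++ y :: v' ++ s = p ++ (x :: (u' ++ g ++ y :: v' ++ s)) by simp,
    List.set_append_right _ _ (le_refl _), Nat.sub_self, List.set_cons_zero]
  rw [show p ++ PySem.Int.mod (x + y) pvMOD :: (u' ++ g ++ y :: v' ++ s)
      = (p ++ PySem.Int.mod (x + y) pvMOD :: u' ++ g) ++ (y :: (v' ++ s)) by simp,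
    List.set_append_right _ _ (by simp at hu ⊢; omega)]
  have hz2 : p.length + h - (p ++ PySem.Int.mod (x + y) pvMOD :: u' ++ g).length = 0 := by
    simp at hu ⊢; omega
  rw [hz2, List.set_cons_zero]
  simp

-- the inner j-loop acts on one block: first half u (length t), gap g up to offset h, second half v
theorem inner_block (t : Nat) : ∀ (h : Nat) (p u g v s : List Int),
    u.length = t → v.length = t → g.length = h - t → t ≤ h →
    (List.range t).foldl (fun b k => bflyN b (p.length + k) h) (p ++ u ++ g ++ v ++ s)
      = p ++ pvZipAdd u v ++ g ++ pvZipSub u v ++ s := by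
  induction t with
  | zero =>
    intro h p u g v s hu hv hg ht
    rw [List.length_eq_zero_iff.mp hu, List.length_eq_zero_iff.mp hv]
    simp [pvZipAdd, pvZipSub]
  | succ t ih =>
    intro h p u g v s hu hv hg ht
    obtain ⟨x, u', rfl⟩ : ∃ x u', u = x :: u' := by
      cases u with | nil => simp at hu | cons a b => exact ⟨a, b, rfl⟩
    obtain ⟨y, v', rfl⟩ : ∃ y v', v = y :: v' := by
      cases v with | nil => simp at hv | cons a b => exact ⟨a, b, rfl⟩
    rw [List.range_succ_eq_map, List.foldl_cons, List.foldl_map]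
    rw [show p.length + 0 = p.length by omega]
    rw [bflyN_block p u' g v' s x y h (by simp at hu hg ⊢; omega)]
    have harr : (fun (b : List Int) (k : Nat) => bflyN b (p.length + Nat.succ k) h)
        = fun (b : List Int) (k : Nat) => bflyN b ((p ++ [PySem.Int.mod (x + y) pvMOD]).length + k) h := by
      funext b k; simp; ring_nf
    rw [harr]
    have := ih h (p ++ [PySem.Int.mod (x + y) pvMOD]) u' (g ++ [PySem.Int.mod (x - y) pvMOD]) v' s
      (by simp at hu ⊢; omega) (by simp at hv ⊢; omega) (by simp at hg ⊢; omega) (by omega)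
    rw [show p ++ PySem.Int.mod (x + y) pvMOD :: u' ++ g ++ PySem.Int.mod (x - y) pvMOD :: v' ++ s
        = (p ++ [PySem.Int.mod (x + y) pvMOD]) ++ u' ++ (g ++ [PySem.Int.mod (x - y) pvMOD]) ++ v' ++ s by simp, this]
    simp [pvZipAdd, pvZipSub]

-- the outer i-loop processes m consecutive blocks of size 2h
theorem stage_blocks (m : Nat) : ∀ (h : Nat) (p b s : List Int), b.length = h * 2 * m →
    (List.range m).foldl
        (fun a bi => (List.range h).foldl (fun c kk => bflyN c (p.length + h * 2 * bi + kk) h) a)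
        (p ++ b ++ s)
      = p ++ stageRec h m b ++ s := by
  induction m with
  | zero =>
    intro h p b s hb
    rw [List.length_eq_zero_iff.mp (by omega : b.length = 0)]
    simp [stageRec]
  | succ m ih =>
    intro h p b s hb
    rw [List.range_succ_eq_map, List.foldl_cons, List.foldl_map]
    -- first block: u = b.take h, v = (b.drop h).take h, rest = b.drop (h*2)
    have hdecomp : b = b.take h ++ (b.drop h).take h ++ b.drop (h * 2) := by
      rw [show b.drop (h * 2) = (b.drop h).drop h by rw [List.drop_drop]; ring_nf]
      rw [List.append_assoc, List.take_append_drop, List.take_append_drop]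
    have hge : h * 2 ≤ b.length := by
      rw [hb, Nat.mul_add]; have := Nat.le_add_left (h * 2 * 1) (h * 2 * m); omega
    have hu : (b.take h).length = h := by simp; omega
    have hv : ((b.drop h).take h).length = h := by simp; omega
    have hfun0 : (fun (c : List Int) (kk : Nat) => bflyN c (p.length + h * 2 * 0 + kk) h)
        = fun (c : List Int) (kk : Nat) => bflyN c (p.length + kk) h := by
      funext c kk; ring_nf
    rw [hfun0]
    have h1 : (List.range h).foldl (fun c kk => bflyN c (p.length + kk) h)
        (p ++ b ++ s)
        = p ++ pvZipAdd (b.take h) ((b.drop h).take h) ++ [] ++ pvZipSub (b.take h) ((b.drop h).take h)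
            ++ (b.drop (h * 2) ++ s) := by
      conv_lhs => rw [hdecomp]
      rw [show p ++ (b.take h ++ (b.drop h).take h ++ b.drop (h * 2)) ++ s
          = p ++ b.take h ++ [] ++ (b.drop h).take h ++ (b.drop (h * 2) ++ s) by simp]
      exact inner_block h h p (b.take h) [] ((b.drop h).take h) (b.drop (h * 2) ++ s)
        hu hv (by simp) (le_refl h)
    rw [h1]
    have hfun1 : (fun (a : List Int) (bi : Nat) =>
          (List.range h).foldl (fun c kk => bflyN c (p.length + h * 2 * Nat.succ bi + kk) h) a)
        = fun (a : List Int) (bi : Nat) =>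
          (List.range h).foldl (fun c kk => bflyN c
            ((p ++ pvZipAdd (b.take h) ((b.drop h).take h)
              ++ pvZipSub (b.take h) ((b.drop h).take h)).length + h * 2 * bi + kk) h) a := by
      funext a bi
      congr 1
      funext c kk
      congr 2
      simp only [List.length_append, pvZipAdd, pvZipSub, List.length_zipWith, hu, hv,
        Nat.succ_eq_add_one, Nat.mul_add, min_self]
      omega
    rw [show p ++ pvZipAdd (b.take h) ((b.drop h).take h) ++ [] ++ pvZipSub (b.take h) ((b.drop h).take h)
          ++ (b.drop (h * 2) ++ s)
        = (p ++ pvZipAdd (b.take h) ((b.drop h).take h) ++ pvZipSub (b.take h) ((b.drop h).take h))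
          ++ b.drop (h * 2) ++ s by simp, hfun1,
      ih h _ (b.drop (h * 2)) s (by rw [List.length_drop, hb, Nat.mul_add]; omega)]
    simp [stageRec]

theorem pvStage_eq (h m : Nat) (a : List Int) (hh : 0 < h) (hlen : a.length = h * 2 * m) :
    pvStage a h = stageRec h m a := by
  unfold pvStage
  rw [PySem.List.pyRange_of_pos 0 (a.length : Int) (by positivity)]
  have hcount : (if (0 : Int) < (a.length : Int) then
      (((a.length : Int) - 0 + (h : Int) * 2 - 1) / ((h : Int) * 2)).toNat else 0) = m := by
    rcases Nat.eq_zero_or_pos m with hm | hm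
    · have : a.length = 0 := by rw [hlen, hm]; ring
      simp [this, hm]
    · have hpos : (0 : Int) < (a.length : Int) := by
        have : 0 < a.length := by
          rw [hlen]; positivity
        exact_mod_cast this
      rw [if_pos hpos]
      have heq : ((a.length : Int) - 0 + (h : Int) * 2 - 1) = ((h : Int) * 2 - 1) + ((h : Int) * 2) * m := by
        rw [show ((a.length : Int)) = ((h * 2 * m : Nat) : Int) from by exact_mod_cast hlen]
        push_cast; ring
      rw [heq, Int.add_mul_ediv_left _ _ (show ((h : Int) * 2) ≠ 0 by positivity)]
      rw [Int.ediv_eq_zero_of_lt (by omega) (by omega)]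
      simp
  rw [hcount, List.foldl_map]
  have hfun : (fun (b : List Int) (k : Nat) =>
        (PySem.List.pyRange (0 + (h : Int) * 2 * k) (0 + (h : Int) * 2 * k + (h : Int)) 1).foldl
          (fun c j => pvBfly c j h) b)
      = fun (b : List Int) (bi : Nat) =>
        (List.range h).foldl (fun c kk => bflyN c (([] : List Int).length + h * 2 * bi + kk) h) b := by
    funext b bi
    rw [PySem.List.pyRange_one, List.foldl_map]
    rw [show ((0 + (h : Int) * 2 * bi + (h : Int)) - (0 + (h : Int) * 2 * bi)) = (h : Int) by ring]
    rw [show ((h : Int)).toNat = h by omega]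
    congr 1
    funext c kk
    rw [show (0 + (h : Int) * 2 * (bi : Nat) + (kk : Nat)) = (((h * 2 * bi + kk : Nat)) : Int) by push_cast; ring]
    rw [pvBfly_natCast]
    congr 1
    simp
  rw [hfun]
  have := stage_blocks m h [] a [] hlen
  simpa using this

theorem stageRec_split (m1 : Nat) : ∀ (m2 h : Nat) (l r : List Int), l.length = h * 2 * m1 →
    stageRec h (m1 + m2) (l ++ r) = stageRec h m1 l ++ stageRec h m2 r := by
  induction m1 with
  | zero =>
    intro m2 h l r hl
    rw [List.length_eq_zero_iff.mp (by omega : l.length = 0)]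
    simp [stageRec]
  | succ m1 ih =>
    intro m2 h l r hl
    have hge : h * 2 ≤ l.length := by
      rw [hl, Nat.mul_add]; have := Nat.le_add_left (h * 2 * 1) (h * 2 * m1); omega
    rw [show m1 + 1 + m2 = (m1 + m2) + 1 from by omega]
    show pvZipAdd ((l ++ r).take h) (((l ++ r).drop h).take h)
        ++ pvZipSub ((l ++ r).take h) (((l ++ r).drop h).take h)
        ++ stageRec h (m1 + m2) ((l ++ r).drop (h * 2))
      = stageRec h (m1 + 1) l ++ stageRec h m2 r
    rw [List.take_append_of_le_length (by omega), List.drop_append_of_le_length (by omega),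
      List.take_append_of_le_length (by simp; omega), List.drop_append_of_le_length (by omega)]
    rw [ih m2 h (l.drop (h * 2)) r (by rw [List.length_drop, hl, Nat.mul_add]; omega)]
    show _ = pvZipAdd (l.take h) ((l.drop h).take h) ++ pvZipSub (l.take h) ((l.drop h).take h)
        ++ stageRec h m1 (l.drop (h * 2)) ++ stageRec h m2 r
    simp [List.append_assoc]

theorem stageRec_length (m : Nat) : ∀ (h : Nat) (b : List Int), b.length = h * 2 * m →
    (stageRec h m b).length = b.length := by
  induction m with
  | zero => intro h b hb; simp [stageRec]
  | succ m ih =>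
    intro h b hb
    have hge : h * 2 ≤ b.length := by
      rw [hb, Nat.mul_add]; have := Nat.le_add_left (h * 2 * 1) (h * 2 * m); omega
    show (pvZipAdd (b.take h) ((b.drop h).take h) ++ pvZipSub (b.take h) ((b.drop h).take h)
        ++ stageRec h m (b.drop (h * 2))).length = b.length
    rw [List.length_append, List.length_append,
      ih h (b.drop (h * 2)) (by rw [List.length_drop, hb, Nat.mul_add]; omega)]
    simp [pvZipAdd, pvZipSub]
    omega

-- proof-side form of A's stage loop (h = 1, 2, 4, …)
def pvL : Nat → List Int → List Int
  | 0, a => a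
  | k + 1, a => pvStage (pvL k a) (2 ^ k)

theorem loop_eq_pvL (k : Nat) (a : List Int) :
    (List.range k).foldl (fun (p : List Int × Nat) _ => (pvStage p.1 p.2, p.2 * 2)) (a, 1)
      = (pvL k a, 2 ^ k) := by
  induction k with
  | zero => simp [pvL]
  | succ k ih => rw [List.range_succ, List.foldl_append, ih]; simp [pvL, pow_succ]

theorem pvL_length (k : Nat) : ∀ (a : List Int), 2 ^ k ∣ a.length → (pvL k a).length = a.length := by
  induction k with
  | zero => intro a _; rfl
  | succ k ih =>
    intro a hdvd
    have hk : 2 ^ k ∣ a.length := dvd_trans (pow_dvd_pow 2 (Nat.le_succ k)) hdvd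
    obtain ⟨m, hm⟩ := hdvd
    have hlen : (pvL k a).length = 2 ^ k * 2 * m := by
      rw [ih a hk, hm, pow_succ]
    show (pvStage (pvL k a) (2 ^ k)).length = a.length
    rw [pvStage_eq (2 ^ k) m _ (by positivity) hlen, stageRec_length m _ _ hlen, ih a hk]

theorem pvL_split (k : Nat) : ∀ (l r : List Int), 2 ^ k ∣ l.length → 2 ^ k ∣ r.length →
    pvL k (l ++ r) = pvL k l ++ pvL k r := by
  induction k with
  | zero => intro l r _ _; rfl
  | succ k ih =>
    intro l r hl hr
    have hlk : 2 ^ k ∣ l.length := dvd_trans (pow_dvd_pow 2 (Nat.le_succ k)) hl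
    have hrk : 2 ^ k ∣ r.length := dvd_trans (pow_dvd_pow 2 (Nat.le_succ k)) hr
    obtain ⟨m1, hm1⟩ := hl
    obtain ⟨m2, hm2⟩ := hr
    have hll : (pvL k l).length = 2 ^ k * 2 * m1 := by
      rw [pvL_length k l hlk, hm1, pow_succ]
    have hrl : (pvL k r).length = 2 ^ k * 2 * m2 := by
      rw [pvL_length k r hrk, hm2, pow_succ]
    show pvStage (pvL k (l ++ r)) (2 ^ k) = pvStage (pvL k l) (2 ^ k) ++ pvStage (pvL k r) (2 ^ k)
    rw [ih l r hlk hrk]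
    rw [pvStage_eq (2 ^ k) (m1 + m2) _ (by positivity) (by rw [List.length_append, hll, hrl]; ring),
      pvStage_eq (2 ^ k) m1 _ (by positivity) hll,
      pvStage_eq (2 ^ k) m2 _ (by positivity) hrl,
      stageRec_split m1 m2 (2 ^ k) _ _ hll]

theorem pvL_eq_rec (k : Nat) : ∀ (a : List Int), a.length = 2 ^ k → pvL k a = pvFwhtRec a := by
  induction k with
  | zero =>
    intro a ha
    rw [pvFwhtRec, if_pos (by omega)]
    rfl
  | succ k ih =>
    intro a ha
    have h2 : (2 : Nat) ≤ 2 ^ (k + 1) := by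
      calc (2 : Nat) = 2 ^ 1 := rfl
      _ ≤ 2 ^ (k + 1) := Nat.pow_le_pow_right (by norm_num) (by omega)
    have hhalf : a.length / 2 = 2 ^ k := by rw [ha, pow_succ]; omega
    have htl : (a.take (2 ^ k)).length = 2 ^ k := by simp; rw [ha, pow_succ]; omega
    have hdl : (a.drop (2 ^ k)).length = 2 ^ k := by simp; rw [ha, pow_succ]; omega
    have hsplit : pvL k a = pvL k (a.take (2 ^ k)) ++ pvL k (a.drop (2 ^ k)) := by
      conv_lhs => rw [← List.take_append_drop (2 ^ k) a]
      exact pvL_split k _ _ (by rw [htl]) (by rw [hdl])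
    show pvStage (pvL k a) (2 ^ k) = pvFwhtRec a
    rw [hsplit]
    have hltl : (pvL k (a.take (2 ^ k))).length = 2 ^ k := by rw [pvL_length k _ (by rw [htl]), htl]
    have hldl : (pvL k (a.drop (2 ^ k))).length = 2 ^ k := by rw [pvL_length k _ (by rw [hdl]), hdl]
    rw [pvStage_eq (2 ^ k) 1 _ (by positivity) (by simp [hltl, hldl]; ring)]
    simp only [stageRec]
    rw [List.take_left' hltl, List.drop_left' hltl,
      List.take_of_length_le (le_of_eq hldl),
      List.drop_of_length_le
        (l := pvL k (List.take (2 ^ k) a) ++ pvL k (List.drop (2 ^ k) a))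
        (by simp [hltl, hldl]; omega),
      List.append_nil, ih _ htl, ih _ hdl]
    conv_rhs => rw [pvFwhtRec]
    simp only [if_neg (show ¬ a.length ≤ 1 by omega), hhalf]

theorem bitLength_pow_sub_one (k : Nat) : PySem.Int.bitLength ((2 ^ k : Nat) - (1 : Int)) = k := by
  rcases Nat.eq_zero_or_pos k with h0 | h0
  · subst h0; norm_num [PySem.Int.bitLength_zero]
  · have hpow : (1 : Nat) < 2 ^ k := Nat.one_lt_two_pow_iff.mpr (by omega)
    have h2 : (((2 ^ k : Nat) : Int) - 1).natAbs = 2 ^ k - 1 := by omega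
    have hne : (((2 ^ k : Nat) : Int) - 1) ≠ 0 := by
      intro hz
      have : ((2 ^ k : Nat) : Int) = 1 := by omega
      have : (2 ^ k : Nat) = 1 := by exact_mod_cast this
      omega
    have hlt := PySem.Int.lt_two_pow_bitLength (((2 ^ k : Nat) : Int) - 1)
    have hle := PySem.Int.two_pow_bitLength_le (((2 ^ k : Nat) : Int) - 1) hne
    rw [h2] at hlt hle
    set bl := PySem.Int.bitLength (((2 ^ k : Nat) : Int) - 1) with hbl
    have hk1 : 2 ^ k ≤ 2 ^ bl := by omega
    have hkbl : k ≤ bl := (Nat.pow_le_pow_iff_right (by norm_num)).mp hk1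
    have hb1 : 2 ^ (bl - 1) < 2 ^ k := by omega
    have hblk : bl - 1 < k := (Nat.pow_lt_pow_iff_right (by norm_num)).mp hb1
    omega

theorem pvFWHT_eq (k : Nat) (a : List Int) (hlen : a.length = 2 ^ k) : pvFWHT a = pvFwhtRec a := by
  unfold pvFWHT
  have hbl : PySem.Int.bitLength ((a.length : Int) - 1) = k := by
    rw [hlen]; exact_mod_cast bitLength_pow_sub_one k
  rw [hbl, hlen]
  simp only [Nat.sub_self, List.replicate_zero, List.append_nil]
  rw [loop_eq_pvL]
  exact pvL_eq_rec k a hlen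

theorem pvFwhtRec_length (k : Nat) (a : List Int) (hlen : a.length = 2 ^ k) :
    (pvFwhtRec a).length = a.length := by
  rw [← pvL_eq_rec k a hlen, pvL_length k a (by rw [hlen])]

-- 'for i in range(len(a)): a[i] = F(i, a[i])' is mapIdx
theorem set_loop_mapIdx (l : List Int) : ∀ (F : Nat → Int → Int) (p : List Int),
    (List.range' p.length l.length).foldl (fun b n => b.set n (F n (b.getD n 0))) (p ++ l)
      = p ++ l.mapIdx (fun j x => F (p.length + j) x) := by
  induction l with
  | nil => intro F p; simp
  | cons x l ih =>
    intro F p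
    rw [List.length_cons, List.range'_succ, List.foldl_cons]
    have hget : (p ++ x :: l).getD p.length 0 = x := by
      rw [List.getD_append_right _ _ _ _ (le_refl _), Nat.sub_self]; rfl
    have hset : (p ++ x :: l).set p.length (F p.length x)
        = (p ++ [F p.length x]) ++ l := by
      rw [List.set_append_right _ _ (le_refl _), Nat.sub_self, List.set_cons_zero]
      simp
    rw [hget, hset]
    have := ih F (p ++ [F p.length x])
    rw [show (p ++ [F p.length x]).length = p.length + 1 by simp] at this
    rw [this]
    simp only [List.mapIdx_cons, List.append_assoc, List.singleton_append]
    refine congrArg (fun t => p ++ t) ?_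
    refine congrArg₂ (fun u t => u :: t) (by rw [Nat.add_zero]) ?_
    refine congrArg (fun F' => List.mapIdx F' l) ?_
    funext j y
    congr 1
    omega

theorem py_set_loop (G : Int → Int → Int) (a : List Int) :
    (PySem.List.pyRange 0 (a.length : Int) 1).foldl
        (fun b i => PySem.List.pySetD b i (G i (PySem.List.pyGetD b i 0))) a
      = a.mapIdx (fun j x => G (j : Int) x) := by
  rw [PySem.List.pyRange_zero_nat, List.foldl_map]
  have hfun : (fun (b : List Int) (n : Nat) =>
        PySem.List.pySetD b ((n : Int)) (G (n : Int) (PySem.List.pyGetD b ((n : Int)) 0)))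
      = fun (b : List Int) (n : Nat) => b.set n (G (n : Int) (b.getD n 0)) := by
    funext b n
    rw [PySem.List.pyGetD_natCast, PySem.List.pySetD_natCast]
  rw [hfun, List.range_eq_range']
  have := set_loop_mapIdx a (fun n x => G (n : Int) x) []
  simpa using this

theorem mapIdx_mul_zip (A B : List Int) (h : A.length ≤ B.length) :
    A.mapIdx (fun j x => PySem.Int.mod (x * PySem.List.pyGetD B (j : Int) 0) pvMOD)
      = List.zipWith (fun x y => PySem.Int.mod (x * y) pvMOD) A B := by
  apply List.ext_getElem
  · simp; omega
  · intro i h1 h2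
    rw [List.getElem_mapIdx, List.getElem_zipWith]
    rw [PySem.List.pyGetD_natCast, List.getD_eq_getElem _ _ (by simp at h1 ⊢; omega)]

theorem mapIdx_const_map (a : List Int) (f : Int → Int) :
    a.mapIdx (fun _ x => f x) = a.map f := by
  induction a with
  | nil => rfl
  | cons x t ih => simp [List.mapIdx_cons, ih]

theorem len_le_pow (n k : Nat) (h : PySem.Int.bitLength ((n : Int) - 1) ≤ k) : n ≤ 2 ^ k := by
  rcases Nat.eq_zero_or_pos n with h0 | h0
  · exact h0 ▸ Nat.zero_le _
  · have h1 := PySem.Int.lt_two_pow_bitLength ((n : Int) - 1)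
    have h2 : ((n : Int) - 1).natAbs = n - 1 := by omega
    have h3 : 2 ^ PySem.Int.bitLength ((n : Int) - 1) ≤ 2 ^ k := Nat.pow_le_pow_right (by norm_num) h
    omega

-- ===== VERDICT (by name: the statement is the Claim_ definition above) =====
theorem xorConv_spec : Claim_equal_xorConv := by
  unfold Claim_equal_xorConv Spec_xorConv
  intro X Y _
  simp only [xorConv, xorConv_alt]
  set k := max (PySem.Int.bitLength ((X.length : Int) - 1)) (PySem.Int.bitLength ((Y.length : Int) - 1)) with hk
  have hXle : X.length ≤ 2 ^ k := len_le_pow _ _ (le_max_left _ _)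
  have hYle : Y.length ≤ 2 ^ k := len_le_pow _ _ (le_max_right _ _)
  have hXp : (X ++ List.replicate (2 ^ k - X.length) (0 : Int)).length = 2 ^ k := by simp; omega
  have hYp : (Y ++ List.replicate (2 ^ k - Y.length) (0 : Int)).length = 2 ^ k := by simp; omega
  rw [pvFWHT_eq k _ hXp, pvFWHT_eq k _ hYp]
  set A := pvFwhtRec (X ++ List.replicate (2 ^ k - X.length) 0) with hA
  set B := pvFwhtRec (Y ++ List.replicate (2 ^ k - Y.length) 0) with hB
  have hAl : A.length = 2 ^ k := by rw [hA, pvFwhtRec_length k _ hXp, hXp]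
  have hBl : B.length = 2 ^ k := by rw [hB, pvFwhtRec_length k _ hYp, hYp]
  rw [py_set_loop (fun i x => PySem.Int.mod (x * PySem.List.pyGetD B i 0) pvMOD) A]
  rw [mapIdx_mul_zip A B (by omega)]
  have hCl : (List.zipWith (fun x y => PySem.Int.mod (x * y) pvMOD) A B).length = 2 ^ k := by
    simp [hAl, hBl]
  rw [pvFWHT_eq k _ hCl]
  rw [py_set_loop (fun _ x => PySem.Int.mod
      (x * PySem.Int.powMod (PySem.Int.powMod 2 (pvMOD - 2).toNat pvMOD) k pvMOD) pvMOD) _]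
  rw [mapIdx_const_map]
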